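-- pv_equiv track=rewrite | github.com/dun933/text_recognition | crnn_pbcquoc/run.py | make_input
-- ===== SOURCE A (Python) =====
-- def make_input(inp):
--     inp = inp.split(',')
--     inp = [i.rstrip().lstrip() for i in inp]
--     output = {}
--     output['city'] = None
--     output['district'] = None
--     output['ward'] = None
--     output['street'] = None
--     if len(inp) > 3:
--         output['city'] = inp[-1]
--         output['district'] = inp[-2]
--         output['ward'] = inp[-3]
--         output['street'] = inp[-4]
--     elif len(inp) == 3:
--         output['city'] = inp[-1]
--         output['district'] = inp[-2]
--         output['ward'] = inp[-3]
--     elif len(inp) == 2: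
--         output['city'] = inp[-1]
--         output['district'] = inp[-2]
--     elif len(inp) == 1:
--         output['city'] = inp[-1]
--     return output
-- ===== SOURCE B (Python) =====
-- def make_input(inp):
--     parts = [p.strip() for p in inp.split(',')]
--     padded = [None, None, None, None] + parts
--     city, district, ward, street = padded[-4:][::-1]
--     return {'city': city, 'district': district, 'ward': ward, 'street': street}
-- ===== Notes on version B (the rewrite author's own statement) =====
-- stated objective: simpler
-- what changed: Replaces A's four-way length if/elif cascade with negative indexing and dict mutation by arithmetic padding: left-pad the stripped parts with four Nones, slice the last four, unpack them in reverse into a dict literal.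
import Mathlib
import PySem

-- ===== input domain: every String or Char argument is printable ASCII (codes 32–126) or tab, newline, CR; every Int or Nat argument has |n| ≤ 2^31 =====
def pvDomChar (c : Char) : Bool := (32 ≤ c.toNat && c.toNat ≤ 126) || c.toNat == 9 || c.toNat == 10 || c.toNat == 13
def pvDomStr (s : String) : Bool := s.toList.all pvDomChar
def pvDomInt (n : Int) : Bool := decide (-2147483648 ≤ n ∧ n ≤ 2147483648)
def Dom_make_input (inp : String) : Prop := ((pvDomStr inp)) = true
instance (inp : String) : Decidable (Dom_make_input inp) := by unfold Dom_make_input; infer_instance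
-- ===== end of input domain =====

-- B replaces A's four-way length cascade with left-padding by four Nones, slicing the
-- last four, and unpacking them in reverse into a dict literal (simpler decomposition).

-- ===== PORT A =====
-- negative indices in A are always in range in the branch that uses them, so pyGetD's "" default is never reached
def make_input (inp : String) : List (String × Option String) :=
  let parts := ((PySem.Str.split? inp ",").getD []).map (fun i => PySem.Str.lstrip (PySem.Str.rstrip i))
  let output : PySem.Dict String (Option String) := PySem.Dict.empty
  let output := output.insert "city" none
  let output := output.insert "district" none
  let output := output.insert "ward" none
  let output := output.insert "street" none
  let output :=
    if parts.length > 3 then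
      (((output.insert "city" (some (PySem.List.pyGetD parts (-1) ""))).insert
          "district" (some (PySem.List.pyGetD parts (-2) ""))).insert
          "ward" (some (PySem.List.pyGetD parts (-3) ""))).insert
          "street" (some (PySem.List.pyGetD parts (-4) ""))
    else if parts.length = 3 then
      ((output.insert "city" (some (PySem.List.pyGetD parts (-1) ""))).insert
          "district" (some (PySem.List.pyGetD parts (-2) ""))).insert
          "ward" (some (PySem.List.pyGetD parts (-3) ""))
    else if parts.length = 2 then
      (output.insert "city" (some (PySem.List.pyGetD parts (-1) ""))).insert
          "district" (some (PySem.List.pyGetD parts (-2) ""))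
    else if parts.length = 1 then
      output.insert "city" (some (PySem.List.pyGetD parts (-1) ""))
    else output
  output.items

-- ===== PORT B =====
-- padded always has length ≥ 4, so padded[-4:] has exactly 4 elements and the
-- 4-way unpacking in Source B never raises: the catch-all match arm is unreachable.
def make_input_alt (inp : String) : List (String × Option String) :=
  let parts := ((PySem.Str.split? inp ",").getD []).map PySem.Str.strip
  let padded : List (Option String) := [none, none, none, none] ++ parts.map some
  match (PySem.List.slice padded (some (-4)) none).reverse with
  | [city, district, ward, street] =>
    (((((PySem.Dict.empty : PySem.Dict String (Option String)).insert "city" city).insert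
        "district" district).insert "ward" ward).insert "street" street).items
  | _ => []

-- ===== PRECONDITION & SPEC =====
def Spec_make_input (inp : String) (out : List (String × Option String)) : Prop := out = make_input_alt inp
instance (inp : String) (out : List (String × Option String)) : Decidable (Spec_make_input inp out) := by unfold Spec_make_input; infer_instance

-- ===== CLAIM (what is proved, stated in full; the proofs are below) =====
def Claim_equal_make_input : Prop := ∀ (inp : String), Dom_make_input inp → Spec_make_input inp (make_input inp)

-- ===== LEMMAS AND PROOFS =====

-- rdropWhile of a cons, when the head survives for either reason
lemma rdropWhile_cons_of {α : Type} (p : α → Bool) (a : α) (t : List α)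
    (h : ¬ p a = true ∨ List.rdropWhile p t ≠ []) :
    List.rdropWhile p (a :: t) = a :: List.rdropWhile p t := by
  simp only [List.rdropWhile, List.reverse_cons, List.dropWhile_append]
  rcases eq_or_ne (List.dropWhile p t.reverse) [] with hnil | hnil
  · have hpa : ¬ p a = true := by
      rcases h with h | h
      · exact h
      · exact absurd (by simp [List.rdropWhile, hnil]) h
    simp [hnil, List.dropWhile, hpa]
  · simp [List.isEmpty_iff.ne.mpr hnil]

-- stripping both ends commutes: lstrip ∘ rstrip = rstrip ∘ lstrip (on char lists)
lemma dropWhile_rdropWhile_comm {α : Type} (p : α → Bool) (l : List α) :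
    List.dropWhile p (List.rdropWhile p l) = List.rdropWhile p (List.dropWhile p l) := by
  induction l with
  | nil => simp
  | cons a t ih =>
    by_cases hpa : p a = true
    · rcases eq_or_ne (List.rdropWhile p t) [] with h | h
      · have ht : ∀ x ∈ t, p x := List.rdropWhile_eq_nil_iff.mp h
        have h2 : List.rdropWhile p (a :: t) = [] :=
          List.rdropWhile_eq_nil_iff.mpr (by
            intro x hx
            rcases List.mem_cons.mp hx with rfl | hx
            · exact hpa
            · exact ht x hx)
        have h3 : List.dropWhile p t = [] := List.dropWhile_eq_nil_iff.mpr ht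
        simp [h2, hpa, h3]
      · rw [rdropWhile_cons_of p a t (Or.inr h)]
        simp [hpa, ih]
    · rw [rdropWhile_cons_of p a t (Or.inl hpa)]
      simp only [List.dropWhile_cons, hpa, if_false, Bool.false_eq_true]
      rw [rdropWhile_cons_of p a t (Or.inl hpa)]

-- Chars.rstrip IS List.rdropWhile of isspace
lemma chars_rstrip_eq (l : List Char) :
    PySem.Chars.rstrip l = List.rdropWhile PySem.Chars.isspace l := rfl

-- A's i.rstrip().lstrip() equals B's i.strip()
lemma lstrip_rstrip_eq_strip (s : String) :
    PySem.Str.lstrip (PySem.Str.rstrip s) = PySem.Str.strip s := by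
  simp only [PySem.Str.lstrip, PySem.Str.rstrip, PySem.Str.strip, PySem.Chars.strip,
    String.toList_ofList, PySem.Chars.lstrip, chars_rstrip_eq]
  rw [dropWhile_rdropWhile_comm]

-- Python xs[-(k+1)] with default is getD k on the reversed list
lemma pyGetD_neg_reverse {α : Type} (ys : List α) (k : Nat) (d : α) :
    PySem.List.pyGetD ys.reverse (-((k : Int) + 1)) d = ys.getD k d := by
  simp only [PySem.List.pyGetD, PySem.List.pyGet?, PySem.List.pyIdx?, List.length_reverse]
  by_cases hk : k < ys.length
  · have h1 : ¬ (0 : Int) ≤ -((k : Int) + 1) := by omega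
    have h2 : -((ys.length : Int)) ≤ -((k : Int) + 1) := by omega
    have h3 : (-(-((k : Int) + 1))).toNat = k + 1 := by omega
    have h4 : ys.length - (k + 1) < ys.length := by omega
    simp only [h1, if_false, h2, if_true, h3, Option.bind]
    rw [List.getElem?_eq_getElem (by simpa using h4)]
    simp only [Option.getD_some, List.getElem_reverse]
    rw [List.getD_eq_getElem ys d hk]
    congr 1
    omega
  · have h2 : ¬ (-((ys.length : Int)) ≤ -((k : Int) + 1)) := by omega
    have h1 : ¬ (0 : Int) ≤ -((k : Int) + 1) := by omega
    simp only [h1, if_false, h2, Option.bind_none, Option.getD_none]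
    rw [List.getD_eq_default ys d (by omega)]

-- numeral-index form of pyGetD_neg_reverse, usable with rw on literal indices
lemma pyGetD_neg_reverse' {α : Type} (ys : List α) (k : Nat) (d : α) (i : Int)
    (h : i = -((k : Int) + 1)) :
    PySem.List.pyGetD ys.reverse i d = ys.getD k d := by
  rw [h, pyGetD_neg_reverse]

-- B's padded[-4:] when the un-padded part list is ys.reverse with ys = e1::e2::e3::e4::rest:
-- the slice drops exactly the padding plus all but the last four parts
lemma slice_padded_big {α : Type} (e1 e2 e3 e4 : α) (rest : List α)
    (n : List (Option α)) (hn : n.length = 4) :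
    PySem.List.slice (n ++ ((e1 :: e2 :: e3 :: e4 :: rest).reverse).map some)
      (some (-4)) none = [some e4, some e3, some e2, some e1] := by
  rw [PySem.List.slice_from_neg_ofNat _ 4 (by omega)]
  have hrev : (e1 :: e2 :: e3 :: e4 :: rest).reverse
      = rest.reverse ++ [e4, e3, e2, e1] := by simp
  rw [hrev, List.map_append, ← List.append_assoc]
  rw [List.drop_left' (by simp [hn]; omega)]
  rfl

-- ===== VERDICT (by name: the statement is the Claim_ definition above) =====
theorem make_input_spec : Claim_equal_make_input := by
  intro inp _
  unfold Spec_make_input make_input make_input_alt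
  simp only [lstrip_rstrip_eq_strip]
  generalize ((PySem.Str.split? inp ",").getD []).map PySem.Str.strip = xs
  rw [← List.reverse_reverse xs]
  generalize xs.reverse = ys
  rcases ys with _ | ⟨e1, _ | ⟨e2, _ | ⟨e3, _ | ⟨e4, rest⟩⟩⟩⟩
  · rfl
  · rfl
  · rfl
  · rfl
  · rw [pyGetD_neg_reverse' (e1 :: e2 :: e3 :: e4 :: rest) 0 "" (-1) (by norm_num),
       pyGetD_neg_reverse' (e1 :: e2 :: e3 :: e4 :: rest) 1 "" (-2) (by norm_num),
       pyGetD_neg_reverse' (e1 :: e2 :: e3 :: e4 :: rest) 2 "" (-3) (by norm_num),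
       pyGetD_neg_reverse' (e1 :: e2 :: e3 :: e4 :: rest) 3 "" (-4) (by norm_num)]
    simp only [List.length_reverse, List.length_cons]
    rw [slice_padded_big e1 e2 e3 e4 rest [none, none, none, none] rfl]
    have hlen : rest.length + 1 + 1 + 1 + 1 > 3 := by omega
    rw [if_pos hlen]
    rfl
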